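-- pv_equiv track=rewrite | github.com/serdarselcuk/pythonStuduy | leetcode/1051. Height Checker.py | sort_heights
-- ===== SOURCE A (Python) =====
-- def sort_heights(kume):
--     count = 0
--     # min vals of list are not necessary to iterate
--     mini_count = kume.count(min(kume))
--     for char in range((len(kume)) - mini_count):
--         maxi = max(kume)
--         # if index of maxi is at the beginning it dont need to change its places
--         if kume.index(maxi) != 0:
--             kume.remove(maxi)
--             count += 1
--         else:
--             kume.remove(maxi)
--     return count
-- ===== SOURCE B (Python) =====
-- def sort_heights(kume):
--     # One pass: an element must move iff some earlier element is strictly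
--     # smaller, i.e. iff it exceeds the running minimum of the prefix.
--     # (Unlike A, this does not mutate kume; the equivalence is about the
--     # return value. On an empty list A raises ValueError, B returns 0.)
--     count = 0
--     m = None
--     for x in kume:
--         if m is not None and x > m:
--             count += 1
--         else:
--             m = x
--     return count
-- ===== Notes on version B (the rewrite author's own statement) =====
-- stated objective: faster
-- what changed: Replaced the repeated max/index/remove loop (quadratic passes over a shrinking list) by a single pass counting elements that exceed the running minimum of the prefix; A also empties the argument list in place, B leaves it untouched.
import Mathlib
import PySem

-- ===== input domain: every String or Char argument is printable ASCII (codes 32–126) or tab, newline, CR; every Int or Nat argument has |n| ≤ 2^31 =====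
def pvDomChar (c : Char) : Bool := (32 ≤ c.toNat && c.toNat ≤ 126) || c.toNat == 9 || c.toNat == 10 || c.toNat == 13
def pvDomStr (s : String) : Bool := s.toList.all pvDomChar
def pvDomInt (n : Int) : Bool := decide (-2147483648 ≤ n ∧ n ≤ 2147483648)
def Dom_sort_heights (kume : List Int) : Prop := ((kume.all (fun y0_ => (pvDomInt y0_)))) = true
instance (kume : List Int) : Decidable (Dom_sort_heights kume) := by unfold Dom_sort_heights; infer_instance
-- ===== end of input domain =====

-- B replaces A's repeated max/index/remove loop by a single pass counting elements above the
-- running prefix minimum (asymptotically faster); A empties its argument list in place, B does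
-- not mutate it — the equivalence proved here is about the return value only.


-- ===== PORT A =====
-- one iteration of A's for-loop body (the loop variable is unused in Python)
def pyAStep (st : List Int × Int) : List Int × Int :=
  match PySem.List.max? st.1 (fun y => y) with
  | none => st      -- unreachable: the list is nonempty throughout the loop
  | some maxi =>
    if PySem.List.index? st.1 maxi ≠ some 0 then
      ((PySem.List.remove? st.1 maxi).getD st.1, st.2 + 1)
    else
      ((PySem.List.remove? st.1 maxi).getD st.1, st.2)

def sort_heights (kume : List Int) : Int :=
  match PySem.List.min? kume (fun y => y) with
  | none => 0       -- Python raises ValueError here (empty list); outside Pre_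
  | some m =>
    let mini_count : Int := (PySem.List.count kume m : Int)
    ((PySem.List.pyRange 0 ((kume.length : Int) - mini_count) 1).foldl
        (fun st _ => pyAStep st) (kume, (0 : Int))).2

-- ===== PORT B =====
def sort_heights_alt (kume : List Int) : Int :=
  (kume.foldl
      (fun (s : Int × Option Int) x =>
        match s.2 with
        | some m => if x > m then (s.1 + 1, s.2) else (s.1, some x)
        | none => (s.1, some x))
      ((0 : Int), (none : Option Int))).1

-- ===== PRECONDITION & SPEC =====
-- Pre_ excludes only the empty list, on which A raises ValueError (min of empty sequence).
def Pre_sort_heights (kume : List Int) : Prop := kume ≠ []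
instance (kume : List Int) : Decidable (Pre_sort_heights kume) := by unfold Pre_sort_heights; infer_instance
def pvWitness_sort_heights : List Int := [1, 0, 2]

def Spec_sort_heights (kume : List Int) (out : Int) : Prop := out = sort_heights_alt kume
instance (kume : List Int) (out : Int) : Decidable (Spec_sort_heights kume out) := by unfold Spec_sort_heights; infer_instance

-- ===== CLAIM (what is proved, stated in full; the proofs are below) =====
def Claim_equal_sort_heights : Prop := ∀ (kume : List Int), Dom_sort_heights kume → Pre_sort_heights kume → Spec_sort_heights kume (sort_heights kume)

-- ===== LEMMAS AND PROOFS =====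

-- reference count: elements of xs that exceed the running minimum (m = min of the consumed prefix)
def bspec : Int → List Int → Int
  | _, [] => 0
  | m, x :: xs => if x > m then bspec m xs + 1 else bspec x xs

def bfull : List Int → Int
  | [] => 0
  | x :: xs => bspec x xs

lemma bspec_const (m : Int) (xs : List Int) (h : ∀ y ∈ xs, y = m) : bspec m xs = 0 := by
  induction xs with
  | nil => rfl
  | cons x xs ih =>
    have hx : x = m := h x (List.mem_cons_self)
    simp only [bspec, hx, lt_irrefl, if_false]
    exact ih (fun y hy => h y (List.mem_cons_of_mem _ hy))

lemma bspec_top (M : Int) (xs : List Int) (h : ∀ y ∈ xs, y ≤ M) : bspec M xs = bfull xs := by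
  cases xs with
  | nil => rfl
  | cons x xs =>
    have hx : ¬ (x > M) := not_lt.mpr (h x (List.mem_cons_self))
    simp [bspec, bfull, hx]

lemma bspec_erase (l : List Int) (m M : Int) (hub : ∀ y ∈ l, y ≤ M) (hm : m < M)
    (hM : M ∈ l) : bspec m (l.erase M) = bspec m l - 1 := by
  induction l generalizing m with
  | nil => cases hM
  | cons x xs ih =>
    by_cases hx : x = M
    · subst hx
      rw [List.erase_cons_head]
      simp [bspec, hm]
    · rw [List.erase_cons_tail (by simpa using hx)]
      have hM' : M ∈ xs := by cases hM with
        | head => exact absurd rfl hx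
        | tail _ h => exact h
      have hub' : ∀ y ∈ xs, y ≤ M := fun y hy => hub y (List.mem_cons_of_mem _ hy)
      by_cases hxm : x > m
      · simp only [bspec, if_pos hxm]
        rw [ih _ hub' hm hM']; ring
      · have hxM : x < M := lt_of_le_of_ne (hub x (List.mem_cons_self)) hx
        simp only [bspec, if_neg hxm]
        exact ih _ hub' hxM hM'

-- B's fold equals bspec
lemma alt_fold (xs : List Int) (m c : Int) :
    (xs.foldl
      (fun (s : Int × Option Int) x =>
        match s.2 with
        | some m => if x > m then (s.1 + 1, s.2) else (s.1, some x)
        | none => (s.1, some x))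
      (c, some m)).1 = c + bspec m xs := by
  induction xs generalizing m c with
  | nil => simp [bspec]
  | cons x xs ih =>
    simp only [List.foldl_cons, bspec]
    by_cases h : x > m
    · simp only [if_pos h, ih]; ring
    · simp only [if_neg h, ih]

lemma alt_eq_bfull (kume : List Int) : sort_heights_alt kume = bfull kume := by
  cases kume with
  | nil => rfl
  | cons x xs =>
    simp only [sort_heights_alt, bfull, List.foldl_cons]
    rw [alt_fold xs x 0]; ring

-- a for-loop ignoring its loop variable is function iteration
lemma foldl_ignore_iterate {α β : Type} (l : List α) (f : β → β) (init : β) :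
    l.foldl (fun s _ => f s) init = f^[l.length] init := by
  induction l generalizing init with
  | nil => rfl
  | cons x xs ih => simp [List.foldl_cons, ih, Function.iterate_succ_apply]

-- the minimum value survives throughout and A's loop computes bfull
lemma iterA (n : Nat) : ∀ (L : List Int) (c m : Int),
    PySem.List.min? L (fun y => y) = some m →
    n = L.length - PySem.List.count L m →
    (pyAStep^[n] (L, c)).2 = c + bfull L := by
  induction n with
  | zero =>
    intro L c m hmin hn
    have hmem := PySem.List.min?_mem hmin
    have hcle : PySem.List.count L m ≤ L.length := by
      simpa [PySem.List.count_eq] using List.count_le_length (l := L) (a := m)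
    have hcount : PySem.List.count L m = L.length := by omega
    have hall : ∀ y ∈ L, y = m := by
      intro y hy
      have := (List.count_eq_length (l := L) (a := m)).mp (by simpa [PySem.List.count_eq] using hcount)
      exact (this y hy).symm
    have : bfull L = 0 := by
      cases L with
      | nil => rfl
      | cons x xs =>
        have hx : x = m := hall x (List.mem_cons_self)
        simp only [bfull]
        rw [hx]
        exact bspec_const m xs (fun y hy => hall y (List.mem_cons_of_mem _ hy))
    simp [this]
  | succ n ih =>
    intro L c m hmin hn
    have hmem := PySem.List.min?_mem hmin
    have hmlb := PySem.List.min?_isMin hmin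
    have hcle : PySem.List.count L m ≤ L.length := by
      simpa [PySem.List.count_eq] using List.count_le_length (l := L) (a := m)
    have hclt : PySem.List.count L m < L.length := by omega
    -- some element differs from m
    have hex : ∃ y ∈ L, y ≠ m := by
      by_contra h
      push Not at h
      have : PySem.List.count L m = L.length := by
        simpa [PySem.List.count_eq] using (List.count_eq_length (l := L) (a := m)).mpr
          (fun y hy => (h y hy).symm)
      omega
    obtain ⟨y₀, hy₀L, hy₀⟩ := hex
    have hLne : L ≠ [] := by intro h; subst h; cases hy₀L
    obtain ⟨M, hmax⟩ : ∃ M, PySem.List.max? L (fun y => y) = some M := by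
      cases hM : PySem.List.max? L (fun y => y) with
      | none => exact absurd (((PySem.List.max?_eq_none_iff _ _).mp hM)) hLne
      | some M => exact ⟨M, rfl⟩
    have hMub : ∀ y ∈ L, y ≤ M := by
      intro y hy; exact PySem.List.max?_isMax hmax y hy
    have hMmem := PySem.List.max?_mem hmax
    have hmM : m < M :=
      lt_of_lt_of_le (lt_of_le_of_ne (hmlb y₀ hy₀L) (Ne.symm hy₀)) (hMub y₀ hy₀L)
    have hmne : m ≠ M := ne_of_lt hmM
    have hremove : PySem.List.remove? L M = some (L.erase M) :=
      PySem.List.remove?_eq_some_erase L M hMmem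
    cases L with
    | nil => exact absurd rfl hLne
    | cons h t =>
      rw [Function.iterate_succ_apply]
      by_cases hh : h = M
      · -- max at the head: not counted
        subst hh
        have hidx : PySem.List.index? (h :: t) h = some 0 := PySem.List.index?_cons_self h t
        rw [PySem.List.index?_eq_idxOf?] at hidx
        have hstep : pyAStep (h :: t, c) = (t, c) := by
          simp [pyAStep, hmax, hidx, hremove, List.erase_cons_head]
        rw [hstep]
        -- m lives in t
        have hmt : m ∈ t := by
          cases hmem with
          | head => exact absurd rfl hmne
          | tail _ hmem' => exact hmem'
        have htne : t ≠ [] := by intro ht; subst ht; cases hmt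
        obtain ⟨m', hmin'⟩ : ∃ m', PySem.List.min? t (fun y => y) = some m' := by
          cases hm' : PySem.List.min? t (fun y => y) with
          | none => exact absurd (((PySem.List.min?_eq_none_iff _ _).mp hm')) htne
          | some m' => exact ⟨m', rfl⟩
        have hm'm : m' = m := by
          have h1 : m' ≤ m := PySem.List.min?_isMin hmin' m hmt
          have h2 : m ≤ m' := hmlb m' (List.mem_cons_of_mem _ (PySem.List.min?_mem hmin'))
          omega
        rw [hm'm] at hmin'
        have hcnt : PySem.List.count t m = PySem.List.count (h :: t) m := by
          simp [PySem.List.count_eq, Ne.symm hmne]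
        have := ih t c m hmin' (by
          have : (h :: t).length = t.length + 1 := rfl
          omega)
        rw [this]
        have : bfull (h :: t) = bfull t := by
          simp only [bfull]
          exact bspec_top h t (fun y hy => hMub y (List.mem_cons_of_mem _ hy))
        rw [this]
      · -- max not at the head: counted
        have hMt : M ∈ t := by
          cases hMmem with
          | head => exact absurd rfl hh
          | tail _ h' => exact h'
        have hidx : PySem.List.index? (h :: t) M ≠ some 0 := by
          rw [PySem.List.index?_cons_of_ne t hh]
          have hs : (PySem.List.index? t M).isSome := by
            rw [PySem.List.index?_isSome_iff]; exact hMt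
          obtain ⟨k, hk⟩ := Option.isSome_iff_exists.mp hs
          rw [hk]; simp
        rw [PySem.List.index?_eq_idxOf?] at hidx
        have herase : (h :: t).erase M = h :: t.erase M :=
          List.erase_cons_tail (by simpa using hh)
        have hstep : pyAStep (h :: t, c) = (h :: t.erase M, c + 1) := by
          simp [pyAStep, hmax, hidx, hremove, herase]
        rw [hstep]
        -- min of the erased list is still m
        have hmE : m ∈ h :: t.erase M := by
          cases hmem with
          | head => exact List.mem_cons_self
          | tail _ hmem' => exact List.mem_cons_of_mem _ ((List.mem_erase_of_ne hmne).mpr hmem')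
        obtain ⟨m', hmin'⟩ : ∃ m', PySem.List.min? (h :: t.erase M) (fun y => y) = some m' := by
          cases hm' : PySem.List.min? (h :: t.erase M) (fun y => y) with
          | none => simp at hm'
          | some m' => exact ⟨m', rfl⟩
        have hsub : ∀ y ∈ h :: t.erase M, y ∈ h :: t := by
          intro y hy
          cases hy with
          | head => exact List.mem_cons_self
          | tail _ hy' => exact List.mem_cons_of_mem _ (List.mem_of_mem_erase hy')
        have hm'm : m' = m := by
          have h1 : m' ≤ m := PySem.List.min?_isMin hmin' m hmE
          have h2 : m ≤ m' := hmlb m' (hsub m' (PySem.List.min?_mem hmin'))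
          omega
        rw [hm'm] at hmin'
        have hcnt : PySem.List.count (h :: t.erase M) m = PySem.List.count (h :: t) m := by
          simp [PySem.List.count_eq, List.count_cons, List.count_erase_of_ne hmne]
        have hlen : (h :: t.erase M).length = (h :: t).length - 1 := by
          have htpos : 0 < t.length := List.length_pos_of_mem hMt
          simp only [List.length_cons, List.length_erase_of_mem hMt]
          omega
        have := ih (h :: t.erase M) (c + 1) m hmin' (by omega)
        rw [this]
        have hb : bfull (h :: t.erase M) = bfull (h :: t) - 1 := by
          simp only [bfull]
          have hhM : h < M := lt_of_le_of_ne (hMub h List.mem_cons_self) hh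
          rw [bspec_erase t h M (fun y hy => hMub y (List.mem_cons_of_mem _ hy)) hhM hMt]
        rw [hb]; ring

-- ===== VERDICT (by name: the statement is the Claim_ definition above) =====
theorem sort_heights_spec : Claim_equal_sort_heights := by
  intro kume _ hpre
  unfold Spec_sort_heights
  rw [alt_eq_bfull]
  obtain ⟨m, hmin⟩ : ∃ m, PySem.List.min? kume (fun y => y) = some m := by
    cases hm : PySem.List.min? kume (fun y => y) with
    | none => exact absurd (((PySem.List.min?_eq_none_iff _ _).mp hm)) hpre
    | some m => exact ⟨m, rfl⟩
  have hcle : PySem.List.count kume m ≤ kume.length := by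
    simpa [PySem.List.count_eq] using List.count_le_length (l := kume) (a := m)
  unfold sort_heights
  rw [hmin]
  simp only
  rw [foldl_ignore_iterate]
  rw [PySem.List.length_pyRange_one]
  have hlen : ((kume.length : Int) - (PySem.List.count kume m : Int) - 0).toNat
      = kume.length - PySem.List.count kume m := by omega
  rw [hlen, iterA (kume.length - PySem.List.count kume m) kume 0 m hmin rfl]
  ring
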